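-- pv_equiv track=rewrite | github.com/Algo-December/Algo-December | Programmers/Level2_뉴스클러스터링/Level2_뉴스클러스터링_이성재.py | get_nu
-- ===== SOURCE A (Python) =====
-- def counter(multiset):
--     result = {}
--     for x in multiset:
--         result[x] = result.get(x, 0) + 1
--     return result
--
-- def get_nu(set1, set2):
--     counter1 = counter(set1)
--     counter2 = counter(set2)
--
--     ncounter = {}
--     for x, cnt in counter1.items():
--         if x in counter2:
--             ncounter[x] = min(cnt, counter2[x])
--
--     ucounter = counter1
--     for x, cnt in counter2.items():
--         ucounter[x] = max(ucounter.get(x, cnt), cnt)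
--
--     return sum(ncounter.values()), sum(ucounter.values())
-- ===== SOURCE B (Python) =====
-- def get_nu(set1, set2):
--     cnt2 = {}
--     for x in set2:
--         cnt2[x] = cnt2.get(x, 0) + 1
--     cnt1 = {}
--     for x in set1:
--         cnt1[x] = cnt1.get(x, 0) + 1
--     inter = sum(min(c, cnt2.get(x, 0)) for x, c in cnt1.items())
--     return inter, len(set1) + len(set2) - inter
-- ===== Notes on version B (the rewrite author's own statement) =====
-- stated objective: simpler
-- what changed: B computes the intersection size in one pass over one counter (min against the other counter's lookup, no intersection dict) and replaces A's whole max-merge union loop by the multiset identity union = len(set1) + len(set2) - intersection.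
import Mathlib
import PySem

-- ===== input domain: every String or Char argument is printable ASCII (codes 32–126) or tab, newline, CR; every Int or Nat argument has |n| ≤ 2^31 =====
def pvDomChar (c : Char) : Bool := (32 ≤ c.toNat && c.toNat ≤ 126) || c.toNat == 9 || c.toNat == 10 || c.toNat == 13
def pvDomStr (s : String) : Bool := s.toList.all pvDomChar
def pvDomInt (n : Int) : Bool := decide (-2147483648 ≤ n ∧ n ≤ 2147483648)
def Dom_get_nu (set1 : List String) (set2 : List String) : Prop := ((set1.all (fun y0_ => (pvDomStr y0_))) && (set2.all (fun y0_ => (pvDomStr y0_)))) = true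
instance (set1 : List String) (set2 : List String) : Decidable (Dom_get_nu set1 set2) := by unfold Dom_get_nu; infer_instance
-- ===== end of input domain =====

-- B drops A's intersection dict and max-merge union loop: one min-sum pass plus the identity union = len1 + len2 - intersection (simpler decomposition, same value).

-- B drops A's intersection dict and its max-merge union loop: one min-sum pass over one counter plus the identity union = len1 + len2 - intersection (simpler decomposition, same value).

-- ===== PORT A =====
-- helper 'counter' of A
def pvCounterA (multiset : List String) : PySem.Dict String Int :=
  multiset.foldl (fun result x => result.insert x (result.getD x 0 + 1)) PySem.Dict.empty

def get_nu (set1 : List String) (set2 : List String) : Int × Int :=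
  let counter1 := pvCounterA set1
  let counter2 := pvCounterA set2
  -- 'counter2[x]' is read only under the 'x in counter2' guard, so 'getD _ 0' is exact here
  let ncounter := counter1.items.foldl (fun nc p =>
      if counter2.contains p.1 then nc.insert p.1 (min p.2 (counter2.getD p.1 0)) else nc)
    PySem.Dict.empty
  let ucounter := counter2.items.foldl (fun uc p =>
      uc.insert p.1 (max (uc.getD p.1 p.2) p.2)) counter1
  (ncounter.values.foldl (· + ·) 0, ucounter.values.foldl (· + ·) 0)

-- ===== PORT B =====
def get_nu_alt (set1 : List String) (set2 : List String) : Int × Int :=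
  let cnt2 := set2.foldl (fun d x => d.insert x (d.getD x 0 + 1)) PySem.Dict.empty
  let cnt1 := set1.foldl (fun d x => d.insert x (d.getD x 0 + 1)) PySem.Dict.empty
  let inter := cnt1.items.foldl (fun s p => s + min p.2 (cnt2.getD p.1 0)) 0
  (inter, (set1.length : Int) + (set2.length : Int) - inter)

-- ===== PRECONDITION & SPEC =====
def Spec_get_nu (set1 : List String) (set2 : List String) (out : Int × Int) : Prop := out = get_nu_alt set1 set2
instance (set1 : List String) (set2 : List String) (out : Int × Int) : Decidable (Spec_get_nu set1 set2 out) := by unfold Spec_get_nu; infer_instance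

-- ===== CLAIM (what is proved, stated in full; the proofs are below) =====
def Claim_equal_get_nu : Prop := ∀ (set1 : List String) (set2 : List String), Dom_get_nu set1 set2 → Spec_get_nu set1 set2 (get_nu set1 set2)

-- ===== LEMMAS AND PROOFS =====
lemma sum_ite_one (D : List String) (a : String) (hD : D.Nodup) (ha : a ∈ D) :
    (D.map (fun x => if a = x then (1 : Int) else 0)).sum = 1 := by
  induction D with
  | nil => cases ha
  | cons b t ih =>
    rcases List.nodup_cons.1 hD with ⟨hb, ht⟩
    rcases List.mem_cons.1 ha with h | h
    · subst h
      have : ∀ x ∈ t, (if a = x then (1:Int) else 0) = 0 := by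
        intro x hx; rw [if_neg]; rintro rfl; exact hb hx
      simp only [List.map_cons, List.sum_cons]
      rw [List.map_congr_left this]
      simp
    · have hba : a ≠ b := by rintro rfl; exact hb h
      simp only [List.map_cons, List.sum_cons, if_neg hba, ih ht h]
      ring

lemma sum_count (s D : List String) (hD : D.Nodup) (hsub : ∀ x ∈ s, x ∈ D) :
    (D.map (fun x => (s.count x : Int))).sum = s.length := by
  induction s with
  | nil => simp
  | cons a t ih =>
    have h1 : (D.map (fun x => ((a :: t).count x : Int))).sum
        = (D.map (fun x => (t.count x : Int))).sum
          + (D.map (fun x => if a = x then (1:Int) else 0)).sum := by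
      rw [← List.sum_map_add]
      apply congrArg
      apply List.map_congr_left
      intro x hx
      rw [List.count_cons]
      by_cases hax : a = x
      · subst hax; push_cast; simp
      · have hxa : (x == a) = false := beq_eq_false_iff_ne.2 (Ne.symm hax)
        push_cast [hxa, if_neg hax]; simp [hax]
    rw [h1, ih (fun x hx => hsub x (List.mem_cons_of_mem _ hx)),
        sum_ite_one D a hD (hsub a List.mem_cons_self)]
    simp only [List.length_cons]; push_cast; ring
lemma items_foldl_insert_if (l : List (String × Int)) (P : String × Int → Bool)
    (f : String × Int → Int) (d : PySem.Dict String Int)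
    (hnd : (l.map Prod.fst).Nodup) (hfresh : ∀ p ∈ l, d.contains p.1 = false) :
    (l.foldl (fun dd p => if P p then dd.insert p.1 (f p) else dd) d).items
      = d.items ++ (l.filter P).map (fun p => (p.1, f p)) := by
  induction l generalizing d with
  | nil => simp
  | cons p t ih =>
    rw [List.map_cons] at hnd
    rcases List.nodup_cons.1 hnd with ⟨hp, ht⟩
    by_cases hP : P p
    · rw [List.foldl_cons, if_pos hP, ih _ ht
        (fun q hq => by
          rw [PySem.Dict.contains_insert]
          have h1 : (q.1 == p.1) = false := by
            simp only [beq_eq_false_iff_ne]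
            intro he
            exact hp (he ▸ List.mem_map_of_mem hq)
          rw [h1, hfresh q (List.mem_cons_of_mem _ hq)]; rfl),
        PySem.Dict.items_insert_of_not_contains _ _ (hfresh p List.mem_cons_self)]
      simp [hP]
    · rw [List.foldl_cons, if_neg hP, ih _ ht
        (fun q hq => hfresh q (List.mem_cons_of_mem _ hq))]
      simp [hP]

lemma getD_fold_max (K : List String) (v : String → Int) (d : PySem.Dict String Int)
    (x : String) (hK : K.Nodup) :
    ((K.map (fun k => (k, v k))).foldl
        (fun uc p => uc.insert p.1 (max (uc.getD p.1 p.2) p.2)) d).getD x 0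
      = if x ∈ K then max (d.getD x (v x)) (v x) else d.getD x 0 := by
  induction K generalizing d with
  | nil => simp
  | cons k t ih =>
    rcases List.nodup_cons.1 hK with ⟨hk, ht⟩
    rw [List.map_cons, List.foldl_cons, ih _ ht]
    by_cases hxk : x = k
    · subst hxk
      rw [if_neg hk, if_pos List.mem_cons_self, PySem.Dict.getD_insert]
      simp
    · rw [PySem.Dict.getD_insert, PySem.Dict.getD_insert, if_neg hxk, if_neg hxk]
      by_cases hxt : x ∈ t
      · rw [if_pos hxt, if_pos (List.mem_cons_of_mem _ hxt)]
      · rw [if_neg hxt, if_neg (by simp [hxk, hxt])]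

lemma sum_filter_eq (D : List String) (P : String → Bool) (f : String → Int)
    (h0 : ∀ x ∈ D, P x = false → f x = 0) :
    ((D.filter P).map f).sum = (D.map f).sum := by
  induction D with
  | nil => rfl
  | cons a t ih =>
    rw [List.filter_cons]
    by_cases hP : P a
    · simp only [hP, if_pos]
      simp [ih (fun x hx h => h0 x (List.mem_cons_of_mem _ hx) h)]
    · simp only [Bool.not_eq_true] at hP
      simp [hP, ih (fun x hx h => h0 x (List.mem_cons_of_mem _ hx) h),
        h0 a List.mem_cons_self hP]
-- helper: counter's getD at a present key is the count, for ANY default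
lemma getD_counter_any (xs : List String) (x : String) (d0 : Int) (hx : x ∈ xs) :
    (PySem.Dict.counter xs).getD x d0 = xs.count x := by
  apply PySem.Dict.getD_of_mem_items
  · rw [PySem.Dict.items_counter]
    exact List.mem_map_of_mem ((PySem.Set.mem_ofList _ _).2 hx)
  · exact PySem.Dict.nodup_keys_counter xs

-- min-sum over the distinct elements of s1
def minSum (s1 s2 : List String) : Int :=
  ((PySem.Set.ofList s1).map (fun k => min (s1.count k : Int) (s2.count k : Int))).sum

lemma sum_max_min (U : List String) (f g : String → Int) :
    (U.map (fun x => max (f x) (g x))).sum + (U.map (fun x => min (f x) (g x))).sum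
      = (U.map f).sum + (U.map g).sum := by
  induction U with
  | nil => simp
  | cons a t ih =>
    simp only [List.map_cons, List.sum_cons]
    have := max_add_min (f a) (g a)
    omega

lemma pvCounterA_eq (s : List String) : pvCounterA s = PySem.Dict.counter s :=
  PySem.Dict.foldl_insert_getD_add_one_eq_counter s

lemma B1_eq (s1 s2 : List String) : (get_nu_alt s1 s2).1 = minSum s1 s2 := by
  simp only [get_nu_alt, PySem.Dict.foldl_insert_getD_add_one_eq_counter]
  rw [PySem.List.foldl_add (g := fun p : String × Int => min p.2 ((PySem.Dict.counter s2).getD p.1 0))]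
  rw [PySem.Dict.items_counter, List.map_map, minSum]
  rw [List.map_congr_left (fun k _ => by
    simp only [Function.comp]
    rw [PySem.Dict.getD_counter])]
  simp

lemma A1_eq (s1 s2 : List String) : (get_nu s1 s2).1 = minSum s1 s2 := by
  simp only [get_nu, pvCounterA_eq]
  rw [← List.sum_eq_foldl, PySem.Dict.values]
  rw [items_foldl_insert_if _ _ _ _
    (by rw [← PySem.Dict.keys]; exact PySem.Dict.nodup_keys_counter s1)
    (fun p _ => PySem.Dict.contains_empty p.1)]
  rw [PySem.Dict.items_counter]
  simp only [show (PySem.Dict.empty : PySem.Dict String Int).items = [] from rfl,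
    List.nil_append, List.filter_map, List.map_map, Function.comp_def]
  have hpt : ∀ k ∈ List.filter (fun k => (PySem.Dict.counter s2).contains k) (PySem.Set.ofList s1),
      min ((s1.count k : Int)) ((PySem.Dict.counter s2).getD k 0)
        = min ((s1.count k : Int)) ((s2.count k : Int)) := by
    intro k _
    rw [PySem.Dict.getD_counter]
  rw [List.map_congr_left hpt, minSum]
  apply sum_filter_eq
  intro x hx hfalse
  rw [PySem.Dict.contains_counter] at hfalse
  have h2 : s2.count x = 0 := by
    rw [List.count_eq_zero]
    intro hmem
    rw [List.contains_eq_mem, decide_eq_false_iff_not] at hfalse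
    exact hfalse hmem
  rw [h2]
  simp

lemma B2_eq (s1 s2 : List String) :
    (get_nu_alt s1 s2).2 = (s1.length : Int) + (s2.length : Int) - minSum s1 s2 := by
  have := B1_eq s1 s2
  simp only [get_nu_alt] at this ⊢
  omega

lemma A2_eq (s1 s2 : List String) :
    (get_nu s1 s2).2 = (s1.length : Int) + (s2.length : Int) - minSum s1 s2 := by
  simp only [get_nu, pvCounterA_eq]
  rw [← List.sum_eq_foldl]
  set c1 := PySem.Dict.counter s1 with hc1
  set D1 := PySem.Set.ofList s1 with hD1
  set D2 := PySem.Set.ofList s2 with hD2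
  have hitems : (PySem.Dict.counter s2).items = D2.map (fun k => (k, (s2.count k : Int))) :=
    PySem.Dict.items_counter s2
  rw [hitems]
  set u := (D2.map (fun k => (k, (s2.count k : Int)))).foldl
      (fun uc p => uc.insert p.1 (max (uc.getD p.1 p.2) p.2)) c1 with hu
  have hnodU : (PySem.Set.update D1 D2).Nodup :=
    PySem.Set.nodup_update _ _ (PySem.Set.nodup_ofList s1)
  have hkeys : u.keys = PySem.Set.update D1 D2 := by
    rw [hu, PySem.Dict.keys_foldl_insert_key (key := Prod.fst)
          (f := fun (d : PySem.Dict String Int) (x : String × Int) => max (d.getD x.1 x.2) x.2),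
        List.map_map]
    simp [hc1, PySem.Dict.keys_counter, Function.comp_def]
    rfl
  have hvals : u.values = u.keys.map (fun k => u.getD k 0) :=
    PySem.Dict.values_eq_map_keys u (hkeys ▸ hnodU) 0
  rw [hvals, hkeys]
  have hpt : ∀ x ∈ PySem.Set.update D1 D2,
      u.getD x 0 = max ((s1.count x : Int)) ((s2.count x : Int)) := by
    intro x hx
    rw [hu, getD_fold_max _ _ _ _ (PySem.Set.nodup_ofList s2)]
    by_cases hx2 : x ∈ D2
    · rw [if_pos hx2]
      by_cases hx1 : x ∈ s1
      · rw [hc1, getD_counter_any s1 x _ hx1]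
      · have hnc : c1.getD x ((s2.count x : Int)) = (s2.count x : Int) := by
          apply PySem.Dict.getD_of_not_contains
          rw [hc1, PySem.Dict.contains_counter]
          simpa [List.contains_eq_mem] using hx1
        rw [hnc, List.count_eq_zero.2 hx1, max_self]
        rw [Nat.cast_zero, max_eq_right (Int.natCast_nonneg _)]
    · rw [if_neg hx2]
      have hx1 : x ∈ D1 := by
        rcases (PySem.Set.mem_update _ _ _).1 hx with h | h
        · exact h
        · exact absurd ((PySem.Set.mem_ofList _ _).2 ((PySem.Set.mem_ofList _ _).1 h)) hx2
      have hx1' : x ∈ s1 := (PySem.Set.mem_ofList _ _).1 hx1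
      have hx2' : x ∉ s2 := fun h => hx2 ((PySem.Set.mem_ofList _ _).2 h)
      rw [hc1, PySem.Dict.getD_counter, List.count_eq_zero.2 hx2', Nat.cast_zero,
        max_eq_left (Int.natCast_nonneg _)]
  rw [List.map_congr_left hpt]
  have hsum := sum_max_min (PySem.Set.update D1 D2)
      (fun x => (s1.count x : Int)) (fun x => (s2.count x : Int))
  have h1 : ((PySem.Set.update D1 D2).map (fun x => (s1.count x : Int))).sum = s1.length :=
    sum_count s1 _ hnodU
      (fun x hx => (PySem.Set.mem_update _ _ _).2 (Or.inl ((PySem.Set.mem_ofList _ _).2 hx)))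
  have h2 : ((PySem.Set.update D1 D2).map (fun x => (s2.count x : Int))).sum = s2.length :=
    sum_count s2 _ hnodU
      (fun x hx => (PySem.Set.mem_update _ _ _).2 (Or.inr ((PySem.Set.mem_ofList _ _).2 hx)))
  have hmin : ((PySem.Set.update D1 D2).map
      (fun x => min ((s1.count x : Int)) ((s2.count x : Int)))).sum = minSum s1 s2 := by
    rw [PySem.Set.update_eq_append_filter, List.map_append, List.sum_append, minSum, hD1]
    have hz : ((List.filter (fun y => !PySem.Set.contains D1 y) (PySem.Set.ofList D2)).map
        (fun x => min ((s1.count x : Int)) ((s2.count x : Int)))).sum = 0 := by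
      apply List.sum_eq_zero
      intro v hv
      rcases List.mem_map.1 hv with ⟨x, hxf, rfl⟩
      rcases List.mem_filter.1 hxf with ⟨_, hnc⟩
      have hx1 : x ∉ s1 := by
        intro hmem
        have : PySem.Set.contains D1 x = true := by
          rw [PySem.Set.contains_iff]
          exact (PySem.Set.mem_ofList _ _).2 hmem
        rw [this] at hnc; simp at hnc
      rw [List.count_eq_zero.2 hx1, Nat.cast_zero, min_eq_left (Int.natCast_nonneg _)]
    rw [hz, add_zero]
  linarith [hsum, h1, h2, hmin]

-- ===== VERDICT (by name: the statement is the Claim_ definition above) =====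
theorem get_nu_spec : Claim_equal_get_nu := by
  intro set1 set2 _
  unfold Spec_get_nu
  apply Prod.ext
  · rw [A1_eq, B1_eq]
  · rw [A2_eq, B2_eq]
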